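-- pv_equiv track=rewrite | github.com/mdsiaofficial/ProblemSolving | CodeForces/Codeforces Round 861 (Div. 2)/A.py | luckiness
-- ===== SOURCE A (Python) =====
-- def luckiness(x):
--     s = str(x)
--     max_digit, min_digit = 0, 10
--     for c in s:
--         digit = int(c)
--         max_digit = max(max_digit, digit)
--         min_digit = min(min_digit, digit)
--     return max_digit - min_digit
-- ===== SOURCE B (Python) =====
-- def luckiness(x):
--     d = sorted(int(c) for c in str(x))
--     return d[-1] - d[0]
-- ===== Notes on version B (the rewrite author's own statement) =====
-- stated objective: simpler
-- what changed: Replaces the running max/min accumulator loop with a one-liner that sorts the digit list once and subtracts the first sorted digit from the last.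
import Mathlib
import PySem

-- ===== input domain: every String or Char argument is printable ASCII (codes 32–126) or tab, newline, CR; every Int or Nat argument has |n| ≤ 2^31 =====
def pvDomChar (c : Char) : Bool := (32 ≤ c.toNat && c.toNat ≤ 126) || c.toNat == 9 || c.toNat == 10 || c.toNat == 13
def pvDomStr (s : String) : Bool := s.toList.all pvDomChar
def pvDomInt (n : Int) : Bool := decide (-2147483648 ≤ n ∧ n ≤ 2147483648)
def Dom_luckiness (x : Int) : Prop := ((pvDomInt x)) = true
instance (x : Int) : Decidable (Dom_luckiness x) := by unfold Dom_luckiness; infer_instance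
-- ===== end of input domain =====

-- B replaces A's running max/min accumulator loop with sorting the digit list once
-- and subtracting the first sorted digit from the last (objective: simpler).

-- ===== PORT A =====
def luckiness (x : Int) : Int :=
  let s := PySem.Int.toChars x
  let r := s.foldl (fun (st : Int × Int) c =>
      -- digit = int(c); under Pre_ every char of str(x) is a decimal digit,
      -- so ofChars? returns some and the getD 0 default is never used
      let digit := (PySem.Int.ofChars? [c]).getD 0
      (max st.1 digit, min st.2 digit)) (0, 10)
  r.1 - r.2

-- ===== PORT B =====
def luckiness_alt (x : Int) : Int :=
  let d := PySem.List.sorted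
      ((PySem.Int.toChars x).map (fun c => (PySem.Int.ofChars? [c]).getD 0)) id false
  -- d[-1] - d[0]: d is nonempty (str(x) has at least one char), so the defaults are never used
  PySem.List.pyGetD d (-1) 0 - PySem.List.pyGetD d 0 0

-- ===== PRECONDITION & SPEC =====
-- Pre_ excludes negative x, on which Python's int('-') raises ValueError in both A and B.
def Pre_luckiness (x : Int) : Prop := 0 ≤ x
instance (x : Int) : Decidable (Pre_luckiness x) := by unfold Pre_luckiness; infer_instance
def pvWitness_luckiness : Int := (212)
def Spec_luckiness (x : Int) (out : Int) : Prop := out = luckiness_alt x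
instance (x : Int) (out : Int) : Decidable (Spec_luckiness x out) := by unfold Spec_luckiness; infer_instance

-- ===== CLAIM (what is proved, stated in full; the proofs are below) =====
def Claim_equal_luckiness : Prop := ∀ (x : Int), Dom_luckiness x → Pre_luckiness x → Spec_luckiness x (luckiness x)

-- ===== LEMMAS AND PROOFS =====

-- the per-character int() conversion both ports use
def pvDig (c : Char) : Int := (PySem.Int.ofChars? [c]).getD 0

theorem pvDig_digitChar {k : Nat} (hk : k < 10) : pvDig (Nat.digitChar k) = (k : Int) := by
  interval_cases k <;> decide

theorem pvDig_digitChar_bounds {k : Nat} (hk : k < 10) :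
    0 ≤ pvDig (Nat.digitChar k) ∧ pvDig (Nat.digitChar k) ≤ 9 := by
  rw [pvDig_digitChar hk]; omega

theorem toDigitsCore_mem (b f : Nat) (hb0 : 0 < b) : ∀ (n : Nat) (l : List Char) (c : Char),
    c ∈ Nat.toDigitsCore b f n l → c ∈ l ∨ ∃ k, k < b ∧ c = Nat.digitChar k := by
  induction f with
  | zero => intro n l c h; exact Or.inl h
  | succ f ih =>
    intro n l c h
    simp only [Nat.toDigitsCore] at h
    by_cases hq : n / b = 0
    · rw [if_pos hq] at h
      rcases List.mem_cons.mp h with h | h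
      · exact Or.inr ⟨n % b, Nat.mod_lt _ hb0, h⟩
      · exact Or.inl h
    · rw [if_neg hq] at h
      rcases ih (n / b) (Nat.digitChar (n % b) :: l) c h with h' | h'
      · rcases List.mem_cons.mp h' with h'' | h''
        · exact Or.inr ⟨n % b, Nat.mod_lt _ hb0, h''⟩
        · exact Or.inl h''
      · exact Or.inr h'

theorem toDigitsCore_ne_nil (b f : Nat) : ∀ (n : Nat) (l : List Char),
    l ≠ [] → Nat.toDigitsCore b f n l ≠ [] := by
  induction f with
  | zero => intro n l hl; simpa [Nat.toDigitsCore] using hl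
  | succ f ih =>
    intro n l hl
    simp only [Nat.toDigitsCore]
    by_cases hb : n / b = 0
    · rw [if_pos hb]; simp
    · rw [if_neg hb]; exact ih _ _ (by simp)

theorem toDigits_ne_nil (n : Nat) : Nat.toDigits 10 n ≠ [] := by
  unfold Nat.toDigits
  simp only [Nat.toDigitsCore]
  by_cases hb : n / 10 = 0
  · rw [if_pos hb]; simp
  · rw [if_neg hb]; exact toDigitsCore_ne_nil _ _ _ _ (by simp)

theorem toDigits_mem_bounds {n : Nat} {c : Char} (h : c ∈ Nat.toDigits 10 n) :
    0 ≤ pvDig c ∧ pvDig c ≤ 9 := by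
  rcases toDigitsCore_mem 10 (n + 1) (by omega) n [] c h with h' | ⟨k, hk, rfl⟩
  · simp at h'
  · exact pvDig_digitChar_bounds hk

-- the pair fold of A splits into a max fold and a min fold
theorem foldl_pair_split (l : List Int) : ∀ (a b : Int),
    l.foldl (fun (st : Int × Int) d => (max st.1 d, min st.2 d)) (a, b)
      = (l.foldl max a, l.foldl min b) := by
  induction l with
  | nil => intro a b; rfl
  | cons x t ih => intro a b; simp only [List.foldl_cons]; exact ih _ _

theorem foldl_min_const (t : List Int) : ∀ (c : Int), (∀ d ∈ t, c ≤ d) →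
    t.foldl min c = c := by
  induction t with
  | nil => intro c _; rfl
  | cons x t ih =>
    intro c hc
    simp only [List.foldl_cons]
    have hx : c ≤ x := hc x (by simp)
    rw [min_eq_left hx]
    exact ih c (fun d hd => hc d (by simp [hd]))

theorem foldl_min_sorted (s : List Int) (hs : s.Pairwise (· ≤ ·)) (h : Int) (t : List Int)
    (hst : s = h :: t) : ∀ b : Int, s.foldl min b = min b h := by
  subst hst
  intro b
  simp only [List.foldl_cons]
  apply foldl_min_const
  intro d hd
  exact le_trans (min_le_right _ _) ((List.pairwise_cons.mp hs).1 d hd)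

theorem foldl_max_sorted : ∀ (s : List Int), s.Pairwise (· ≤ ·) → ∀ (hne : s ≠ []) (a : Int),
    s.foldl max a = max a (s.getLast hne) := by
  intro s
  induction s with
  | nil => intro _ hne; exact absurd rfl hne
  | cons x t ih =>
    intro hs hne a
    cases t with
    | nil => simp
    | cons y u =>
      have hpt : (y :: u).Pairwise (· ≤ ·) := (List.pairwise_cons.mp hs).2
      have hx : ∀ d ∈ y :: u, x ≤ d := (List.pairwise_cons.mp hs).1
      have hlast : (x :: y :: u).getLast hne = (y :: u).getLast (by simp) :=
        List.getLast_cons (by simp)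
      rw [List.foldl_cons, ih hpt (by simp) (max a x), hlast]
      have hxl : x ≤ (y :: u).getLast (by simp) := hx _ (List.getLast_mem _)
      rw [max_assoc, max_eq_right hxl]

-- A's fold equals last-minus-first of the sorted list, for a nonempty digit list in [0, 9]
theorem key_lemma (l : List Int) (hne : l ≠ []) (hb : ∀ d ∈ l, 0 ≤ d ∧ d ≤ 9) :
    (l.foldl (fun (st : Int × Int) d => (max st.1 d, min st.2 d)) (0, 10)).1
      - (l.foldl (fun (st : Int × Int) d => (max st.1 d, min st.2 d)) (0, 10)).2
      = PySem.List.pyGetD (PySem.List.sorted l id false) (-1) 0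
        - PySem.List.pyGetD (PySem.List.sorted l id false) 0 0 := by
  set s := PySem.List.sorted l id false with hsdef
  have hperm : s.Perm l := PySem.List.sorted_perm l id false
  have hsp : s.Pairwise (· ≤ ·) := by
    have := PySem.List.sorted_pairwise (xs := l) (key := id)
    simpa using this
  have hsne : s ≠ [] := by
    intro h; rw [h] at hperm; exact hne (hperm.symm.eq_nil)
  obtain ⟨h, t, hst⟩ := List.exists_cons_of_ne_nil hsne
  have hbs : ∀ d ∈ s, 0 ≤ d ∧ d ≤ 9 := fun d hd => hb d (hperm.mem_iff.mp hd)
  rw [foldl_pair_split]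
  have hmaxp : l.foldl max 0 = s.foldl max 0 := hperm.symm.foldl_eq 0
  have hminp : l.foldl min 10 = s.foldl min 10 := hperm.symm.foldl_eq 10
  have hlast0 : 0 ≤ s.getLast hsne := (hbs _ (List.getLast_mem hsne)).1
  have hh9 : h ≤ 9 := by
    have := hbs h (by rw [hst]; simp)
    exact this.2
  have hmax : s.foldl max 0 = s.getLast hsne := by
    rw [foldl_max_sorted s hsp hsne 0, max_eq_right hlast0]
  have hmin : s.foldl min 10 = h := by
    rw [foldl_min_sorted s hsp h t hst 10, min_eq_right (by omega)]
  have hget0 : PySem.List.pyGetD s 0 0 = h := by rw [hst]; exact PySem.List.pyGetD_zero_cons _ _ _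
  have hgetm1 : PySem.List.pyGetD s (-1) 0 = s.getLast hsne := PySem.List.pyGetD_neg_one s 0 hsne
  simp only [hmaxp, hminp, hmax, hmin, hget0, hgetm1]

-- ===== VERDICT (by name: the statement is the Claim_ definition above) =====
theorem luckiness_spec : Claim_equal_luckiness := by
  intro x _ hpre
  unfold Spec_luckiness luckiness luckiness_alt
  simp only []
  have hx : ¬ x < 0 := not_lt.mpr hpre
  have hchars : PySem.Int.toChars x = Nat.toDigits 10 x.toNat := by
    simp [PySem.Int.toChars, hx]
  rw [hchars]
  have hfold : (Nat.toDigits 10 x.toNat).foldl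
      (fun (st : Int × Int) c =>
        (max st.1 ((PySem.Int.ofChars? [c]).getD 0), min st.2 ((PySem.Int.ofChars? [c]).getD 0)))
      (0, 10)
      = ((Nat.toDigits 10 x.toNat).map pvDig).foldl
        (fun (st : Int × Int) d => (max st.1 d, min st.2 d)) (0, 10) := by
    rw [List.foldl_map]; rfl
  rw [hfold]
  have hne : (Nat.toDigits 10 x.toNat).map pvDig ≠ [] := by
    simp [toDigits_ne_nil]
  have hb : ∀ d ∈ (Nat.toDigits 10 x.toNat).map pvDig, 0 ≤ d ∧ d ≤ 9 := by
    intro d hd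
    rcases List.mem_map.mp hd with ⟨c, hc, rfl⟩
    exact toDigits_mem_bounds hc
  have := key_lemma ((Nat.toDigits 10 x.toNat).map pvDig) hne hb
  rw [this]
  rfl
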